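-- pv_equiv track=rewrite | github.com/sinandoseyici/Metin-isleme | main.py | tek_problem_i
-- ===== SOURCE A (Python) =====
-- def tek_problem_i(liste):
--     gecici_liste=[]
--     for kelime in liste:
--         yedek_string=""
--         for index in range(len(kelime)):
--             if "i" == kelime[index]:
--                 yedek_string +="İ"
--             else:
--                 yedek_string += kelime[index].upper()
--
--         gecici_liste.append(yedek_string)
--     return    gecici_liste
-- ===== SOURCE B (Python) =====
-- def tek_problem_i(liste):
--     return [kelime.replace("i", "\u0130").upper() for kelime in liste]
-- ===== Notes on version B (the rewrite author's own statement) =====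
-- stated objective: simpler
-- what changed: Replaced the explicit index loop with per-character if/else by a whole-string replace of 'i' with 'İ' followed by str.upper inside a list comprehension.
import Mathlib
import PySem

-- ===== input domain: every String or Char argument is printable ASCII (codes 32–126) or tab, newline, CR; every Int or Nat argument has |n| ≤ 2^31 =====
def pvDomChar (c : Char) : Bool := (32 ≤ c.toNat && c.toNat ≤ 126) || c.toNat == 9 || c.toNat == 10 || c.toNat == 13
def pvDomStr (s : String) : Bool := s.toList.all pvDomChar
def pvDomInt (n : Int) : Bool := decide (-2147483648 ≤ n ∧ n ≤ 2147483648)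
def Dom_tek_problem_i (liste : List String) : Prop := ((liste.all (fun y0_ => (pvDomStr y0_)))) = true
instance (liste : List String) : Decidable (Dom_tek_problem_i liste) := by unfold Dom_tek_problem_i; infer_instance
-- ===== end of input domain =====

-- B replaces A's index loop and per-character if/else by replace("i","İ") + whole-string upper in a comprehension (simpler, same cost).

-- ===== PORT A =====
-- A: for each word, loop over indices, append 'İ' for 'i' else the character's upper; collect into an accumulator list.
def tek_problem_i (liste : List String) : List String :=
  liste.foldl
    (fun gecici kelime =>
      gecici ++ [String.ofList (kelime.toList.foldl
        (fun yedek c =>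
          yedek ++ (if c == 'i' then ['İ'] else [PySem.Chars.upperChar c])) [])])
    []

-- ===== PORT B =====
def tek_problem_i_alt (liste : List String) : List String :=
  liste.map (fun kelime => PySem.Str.upper (PySem.Str.replace kelime "i" "İ"))

-- ===== PRECONDITION & SPEC =====
def Spec_tek_problem_i (liste : List String) (out : List String) : Prop := out = tek_problem_i_alt liste
instance (liste : List String) (out : List String) : Decidable (Spec_tek_problem_i liste out) := by unfold Spec_tek_problem_i; infer_instance

-- ===== CLAIM (what is proved, stated in full; the proofs are below) =====
def Claim_equal_tek_problem_i : Prop := ∀ (liste : List String), Dom_tek_problem_i liste → Spec_tek_problem_i liste (tek_problem_i liste)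

-- ===== LEMMAS AND PROOFS =====

theorem foldl_append_singleton {α β : Type} (f : α → β) (l : List α) (acc : List β) :
    l.foldl (fun a x => a ++ [f x]) acc = acc ++ l.map f := by
  induction l generalizing acc with
  | nil => simp
  | cons c t ih => simp [List.foldl, ih]

-- replace.go with a single-character pattern, enough fuel: pointwise map
theorem replace_go_single (l acc : List Char) (fuel : Nat) (h : l.length ≤ fuel) :
    PySem.Chars.replace.go ['i'] ['İ'] fuel l acc
      = acc.reverse ++ l.map (fun c => if c == 'i' then 'İ' else c) := by
  induction fuel generalizing l acc with
  | zero =>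
    have : l = [] := List.eq_nil_of_length_eq_zero (Nat.le_zero.mp h)
    subst this; simp [PySem.Chars.replace.go]
  | succ n ih =>
    cases l with
    | nil => simp [PySem.Chars.replace.go]
    | cons c t =>
      by_cases hc : c = 'i'
      · subst hc
        have hp : List.isPrefixOf ['i'] ('i' :: t) = true := by
          simp [List.isPrefixOf]
        simp only [PySem.Chars.replace.go, hp, if_true]
        rw [ih] <;> simp at h ⊢ <;> omega
      · have hp : List.isPrefixOf ['i'] (c :: t) = false := by
          simp [List.isPrefixOf]
          exact fun h' => hc h'.symm
        simp only [PySem.Chars.replace.go, hp]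
        rw [if_neg (by simp), ih t (c :: acc) (by simpa using Nat.le_of_succ_le_succ (by simpa using h))]
        simp [hc]

theorem replace_single (cs : List Char) :
    PySem.Chars.replace cs ['i'] ['İ'] = cs.map (fun c => if c == 'i' then 'İ' else c) := by
  have := replace_go_single cs [] cs.length (le_refl _)
  simpa [PySem.Chars.replace] using this

theorem upperChar_dot : PySem.Chars.upperChar 'İ' = 'İ' := by decide

theorem word_eq (kelime : String) :
    String.ofList (kelime.toList.foldl
        (fun yedek c => yedek ++ (if c == 'i' then ['İ'] else [PySem.Chars.upperChar c])) [])
      = PySem.Str.upper (PySem.Str.replace kelime "i" "İ") := by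
  have hfun : (fun (yedek : List Char) (c : Char) =>
        yedek ++ (if c == 'i' then ['İ'] else [PySem.Chars.upperChar c]))
      = (fun yedek c => yedek ++ [if c == 'i' then 'İ' else PySem.Chars.upperChar c]) := by
    funext y c; by_cases hc : c = 'i' <;> simp [hc]
  apply String.toList_inj.mp
  have h1 : (PySem.Str.upper (PySem.Str.replace kelime "i" "İ")).toList
      = PySem.Chars.upper (PySem.Chars.replace kelime.toList ['i'] ['İ']) := by
    have h2 : "i".toList = ['i'] := by decide
    have h3 : "İ".toList = ['İ'] := by decide
    simp [PySem.Str.toList_upper, PySem.Str.toList_replace, h2, h3]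
  rw [h1, hfun, foldl_append_singleton, replace_single, PySem.Chars.upper, List.map_map]
  simp only [String.toList_ofList]
  apply List.map_congr_left
  intro c _
  by_cases hc : c = 'i' <;> simp [hc, upperChar_dot]

-- ===== VERDICT (by name: the statement is the Claim_ definition above) =====
theorem tek_problem_i_spec : Claim_equal_tek_problem_i := by
  intro liste _
  unfold Spec_tek_problem_i tek_problem_i tek_problem_i_alt
  rw [foldl_append_singleton]
  simp only [List.nil_append]
  exact List.map_congr_left (fun kelime _ => word_eq kelime)
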